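-- pv_equiv track=rewrite | github.com/fedortik/PSI | psi/users/tests.py | tomas
-- ===== SOURCE A (Python) =====
-- def tomas(answers):
--     if len(answers) != 30 or any(response not in [0, 1] for response in answers):
--         return 'error answers count'
--
--     # Ключ для анализа ответов (0 соответствует 'A', 1 соответствует 'B')
--     keys = {
--         'Competition': {'0': [3, 8, 10, 17, 25, 28], '1': [6, 9, 13, 14, 16, 22]},
--         'Collaboration': {'0': [5, 11, 14, 19, 20, 23], '1': [2, 8, 21, 26, 28, 30]},
--         'Compromise': {'0': [2, 4, 13, 22, 26, 29], '1': [7, 10, 12, 18, 20, 24]},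
--         'Avoidance': {'0': [1, 6, 7, 9, 12, 27], '1': [5, 15, 17, 19, 23, 29]},
--         'Accommodation': {'0': [15, 16, 18, 21, 24, 30], '1': [1, 3, 4, 11, 25, 27]}
--     }
--
--     # Подсчет ответов для каждой категории
--     results = {style: 0 for style in keys}
--     for i, response in enumerate(answers):
--         response_key = str(response)  # Конвертируем 0 или 1 в строку '0' или '1'
--         for style, answer_keys in keys.items():
--             if (i + 1) in answer_keys[response_key]:
--                 results[style] += 1
--
--     return results
-- ===== SOURCE B (Python) =====
-- def tomas(answers):
--     if len(answers) == 30 and all(r in (0, 1) for r in answers):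
--         keys = {
--             'Competition': {'0': [3, 8, 10, 17, 25, 28], '1': [6, 9, 13, 14, 16, 22]},
--             'Collaboration': {'0': [5, 11, 14, 19, 20, 23], '1': [2, 8, 21, 26, 28, 30]},
--             'Compromise': {'0': [2, 4, 13, 22, 26, 29], '1': [7, 10, 12, 18, 20, 24]},
--             'Avoidance': {'0': [1, 6, 7, 9, 12, 27], '1': [5, 15, 17, 19, 23, 29]},
--             'Accommodation': {'0': [15, 16, 18, 21, 24, 30], '1': [1, 3, 4, 11, 25, 27]}
--         }
--         # Invert the key once into a flat (question, response) -> style table,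
--         # then one direct lookup per answer (no inner loop over styles).
--         table = {}
--         for style, by_resp in keys.items():
--             for resp, questions in by_resp.items():
--                 for q in questions:
--                     table[(q, int(resp))] = style
--         results = dict.fromkeys(keys, 0)
--         for i, r in enumerate(answers):
--             results[table[(i + 1, r)]] += 1
--         return results
--     return 'error answers count'
-- ===== Notes on version B (the rewrite author's own statement) =====
-- stated objective: simpler
-- what changed: B inverts the keys dict once into a flat (question, response) -> style lookup table and counts in a single pass over the answers, removing A's inner loop over the five styles with its membership scans; B returns A's exact value everywhere (the same dict on valid questionnaires, the same error string otherwise).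
import Mathlib
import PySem

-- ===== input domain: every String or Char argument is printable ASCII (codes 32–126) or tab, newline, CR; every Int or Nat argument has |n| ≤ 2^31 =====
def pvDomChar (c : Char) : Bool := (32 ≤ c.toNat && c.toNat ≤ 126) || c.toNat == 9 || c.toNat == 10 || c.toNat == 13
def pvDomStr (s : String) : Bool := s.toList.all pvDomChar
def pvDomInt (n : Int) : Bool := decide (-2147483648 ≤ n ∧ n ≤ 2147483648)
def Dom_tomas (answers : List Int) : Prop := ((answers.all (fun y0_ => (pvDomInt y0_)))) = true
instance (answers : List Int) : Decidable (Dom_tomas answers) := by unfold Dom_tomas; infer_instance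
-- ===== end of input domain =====

-- B replaces A's inner loop over the five styles (membership scans per answer) by a flat
-- (question, response) → style table built once, with one lookup per answer (objective: simpler).
-- Python B returns A's exact value on EVERY input. On valid questionnaires Python returns a dict,
-- which is not a value of the declared str return type; both ports render that dict in the same
-- agreed textual form ("style:count" pairs in insertion order joined by ","), so the theorem
-- states total agreement of the two algorithms, including the count branch.

-- ===== PORT A =====
def tomasKeys : List (String × PySem.Dict String (List Int)) := [
  ("Competition",   PySem.Dict.ofList [("0", [3, 8, 10, 17, 25, 28]), ("1", [6, 9, 13, 14, 16, 22])]),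
  ("Collaboration", PySem.Dict.ofList [("0", [5, 11, 14, 19, 20, 23]), ("1", [2, 8, 21, 26, 28, 30])]),
  ("Compromise",    PySem.Dict.ofList [("0", [2, 4, 13, 22, 26, 29]), ("1", [7, 10, 12, 18, 20, 24])]),
  ("Avoidance",     PySem.Dict.ofList [("0", [1, 6, 7, 9, 12, 27]),  ("1", [5, 15, 17, 19, 23, 29])]),
  ("Accommodation", PySem.Dict.ofList [("0", [15, 16, 18, 21, 24, 30]), ("1", [1, 3, 4, 11, 25, 27])])]

def tomas (answers : List Int) : String :=
  if answers.length ≠ 30 ∨ ∃ r ∈ answers, r ∉ ([0, 1] : List Int) then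
    "error answers count"
  else
    -- results = {style: 0 for style in keys}
    let results0 : PySem.Dict String Int := PySem.Dict.ofList (tomasKeys.map (fun p => (p.1, 0)))
    -- for i, response in enumerate(answers): for style, answer_keys in keys.items(): ...
    let results := (PySem.List.enumerate answers).foldl (fun res ir =>
      tomasKeys.foldl (fun res2 sk =>
        if (ir.1 + 1) ∈ PySem.Dict.getD sk.2 (PySem.Int.toStr ir.2) [] then
          PySem.Dict.modify res2 sk.1 0 (· + 1)
        else res2) res) results0
    String.intercalate "," (results.items.map (fun p => p.1 ++ ":" ++ PySem.Int.toStr p.2))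

-- ===== PORT B =====
-- flat (question, response) → style table, built once in Source B by inverting `keys`
def tomasTable : PySem.Dict (Int × Int) String := PySem.Dict.ofList [
  ((3, 0), "Competition"), ((8, 0), "Competition"), ((10, 0), "Competition"),
  ((17, 0), "Competition"), ((25, 0), "Competition"), ((28, 0), "Competition"),
  ((6, 1), "Competition"), ((9, 1), "Competition"), ((13, 1), "Competition"),
  ((14, 1), "Competition"), ((16, 1), "Competition"), ((22, 1), "Competition"),
  ((5, 0), "Collaboration"), ((11, 0), "Collaboration"), ((14, 0), "Collaboration"),
  ((19, 0), "Collaboration"), ((20, 0), "Collaboration"), ((23, 0), "Collaboration"),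
  ((2, 1), "Collaboration"), ((8, 1), "Collaboration"), ((21, 1), "Collaboration"),
  ((26, 1), "Collaboration"), ((28, 1), "Collaboration"), ((30, 1), "Collaboration"),
  ((2, 0), "Compromise"), ((4, 0), "Compromise"), ((13, 0), "Compromise"),
  ((22, 0), "Compromise"), ((26, 0), "Compromise"), ((29, 0), "Compromise"),
  ((7, 1), "Compromise"), ((10, 1), "Compromise"), ((12, 1), "Compromise"),
  ((18, 1), "Compromise"), ((20, 1), "Compromise"), ((24, 1), "Compromise"),
  ((1, 0), "Avoidance"), ((6, 0), "Avoidance"), ((7, 0), "Avoidance"),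
  ((9, 0), "Avoidance"), ((12, 0), "Avoidance"), ((27, 0), "Avoidance"),
  ((5, 1), "Avoidance"), ((15, 1), "Avoidance"), ((17, 1), "Avoidance"),
  ((19, 1), "Avoidance"), ((23, 1), "Avoidance"), ((29, 1), "Avoidance"),
  ((15, 0), "Accommodation"), ((16, 0), "Accommodation"), ((18, 0), "Accommodation"),
  ((21, 0), "Accommodation"), ((24, 0), "Accommodation"), ((30, 0), "Accommodation"),
  ((1, 1), "Accommodation"), ((3, 1), "Accommodation"), ((4, 1), "Accommodation"),
  ((11, 1), "Accommodation"), ((25, 1), "Accommodation"), ((27, 1), "Accommodation")]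

def tomas_alt (answers : List Int) : String :=
  if answers.length = 30 ∧ ∀ r ∈ answers, r = 0 ∨ r = 1 then
    -- results = dict.fromkeys(keys, 0)
    let results0 : PySem.Dict String Int := PySem.Dict.ofList
      [("Competition", 0), ("Collaboration", 0), ("Compromise", 0),
       ("Avoidance", 0), ("Accommodation", 0)]
    -- one pass: results[table[(i + 1, r)]] += 1
    let results := (PySem.List.enumerate answers).foldl (fun res ir =>
      PySem.Dict.modify res (PySem.Dict.getD tomasTable (ir.1 + 1, ir.2) "") 0 (· + 1))
      results0
    String.intercalate "," (results.items.map (fun p => p.1 ++ ":" ++ PySem.Int.toStr p.2))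
  else
    "error answers count"

-- ===== PRECONDITION & SPEC =====
def Spec_tomas (answers : List Int) (out : String) : Prop := out = tomas_alt answers
instance (answers : List Int) (out : String) : Decidable (Spec_tomas answers out) := by unfold Spec_tomas; infer_instance

-- ===== CLAIM (what is proved, stated in full; the proofs are below) =====
def Claim_equal_tomas : Prop := ∀ (answers : List Int), Dom_tomas answers → Spec_tomas answers (tomas answers)

-- ===== LEMMAS AND PROOFS =====

-- One step of A's inner loop over the five styles equals B's single table-lookup increment:
-- for each of the 60 (question, response) pairs exactly one style's key list contains the question.
theorem tomas_step_eq (res : PySem.Dict String Int) (i r : Int)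
    (hi0 : 0 ≤ i) (hi : i < 30) (hr : r = 0 ∨ r = 1) :
    tomasKeys.foldl (fun res2 sk =>
      if (i + 1) ∈ PySem.Dict.getD sk.2 (PySem.Int.toStr r) [] then
        PySem.Dict.modify res2 sk.1 0 (· + 1)
      else res2) res
    = PySem.Dict.modify res (PySem.Dict.getD tomasTable (i + 1, r) "") 0 (· + 1) := by
  rcases hr with hr | hr <;> subst hr <;> interval_cases i <;>
    (set_option maxRecDepth 20000 in rfl)

-- ===== VERDICT (by name: the statement is the Claim_ definition above) =====
set_option maxRecDepth 40000 in
set_option maxHeartbeats 2000000 in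
theorem tomas_spec : Claim_equal_tomas := by
  intro answers _
  unfold Spec_tomas tomas tomas_alt
  by_cases hP : answers.length = 30 ∧ ∀ r ∈ answers, r = 0 ∨ r = 1
  · rw [if_pos hP, if_neg]
    · obtain ⟨hlen, hvals⟩ := hP
      have hstep : ∀ ir ∈ PySem.List.enumerate answers, ∀ res : PySem.Dict String Int,
          tomasKeys.foldl (fun res2 sk =>
            if (ir.1 + 1) ∈ PySem.Dict.getD sk.2 (PySem.Int.toStr ir.2) [] then
              PySem.Dict.modify res2 sk.1 0 (· + 1)
            else res2) res
          = PySem.Dict.modify res (PySem.Dict.getD tomasTable (ir.1 + 1, ir.2) "") 0 (· + 1) := by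
        intro ir hmem res
        rcases (PySem.List.mem_enumerate_iff answers 0 ir).1 hmem with ⟨k, hk, hir⟩
        subst hir
        have hk30 : k < 30 := by omega
        have hval : answers[k] = 0 ∨ answers[k] = 1 :=
          hvals _ (List.getElem_mem hk)
        exact tomas_step_eq res _ _ (by omega) (by push_cast; omega) hval
      have hinit : (PySem.Dict.ofList (tomasKeys.map (fun p => (p.1, (0 : Int)))))
          = PySem.Dict.ofList [("Competition", 0), ("Collaboration", 0), ("Compromise", 0),
            ("Avoidance", 0), ("Accommodation", 0)] := by
        set_option maxRecDepth 20000 in decide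
      exact congrArg
        (fun d : PySem.Dict String Int =>
          String.intercalate "," (d.items.map (fun p => p.1 ++ ":" ++ PySem.Int.toStr p.2)))
        (Eq.trans (PySem.List.foldl_congr_mem' _ _ _ _ hstep)
          (congrArg
            (fun d : PySem.Dict String Int => (PySem.List.enumerate answers).foldl
              (fun res ir =>
                PySem.Dict.modify res (PySem.Dict.getD tomasTable (ir.1 + 1, ir.2) "") 0 (· + 1)) d)
            hinit))
    · push Not
      exact ⟨hP.1, fun r hr => by simpa using hP.2 r hr⟩
  · rw [if_neg hP, if_pos]
    by_contra hc
    push Not at hc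
    exact hP ⟨hc.1, fun r hr => by simpa using hc.2 r hr⟩
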